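-- pv_equiv track=rewrite | github.com/suhasgumma/Problem-Solving | codeForces/Round671Div2/sageBirthdayHard.py | countPeaks
-- ===== SOURCE A (Python) =====
-- def countPeaks(arr):
--     if len(arr)<=2: return 0
--
--     res = 0
--
--     i = 0
--     j = i+2
--
--     while j < len(arr):
--         left = arr[i]
--         right = arr[j]
--
--         middle = arr[i+1]
--
--         if middle< left and middle < right: res+=1
--
--         i+=1
--         j+=1
--
--     return res
-- ===== SOURCE B (Python) =====
-- def countPeaks(arr):
--     d = [b - a for a, b in zip(arr, arr[1:])]
--     return sum(1 for x, y in zip(d, d[1:]) if x < 0 and y > 0)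
-- ===== Notes on version B (the rewrite author's own statement) =====
-- stated objective: alternative
-- what changed: Replaces the index-window while loop with a two-pass difference-table approach: build consecutive differences, then count descents immediately followed by ascents.
import Mathlib
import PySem

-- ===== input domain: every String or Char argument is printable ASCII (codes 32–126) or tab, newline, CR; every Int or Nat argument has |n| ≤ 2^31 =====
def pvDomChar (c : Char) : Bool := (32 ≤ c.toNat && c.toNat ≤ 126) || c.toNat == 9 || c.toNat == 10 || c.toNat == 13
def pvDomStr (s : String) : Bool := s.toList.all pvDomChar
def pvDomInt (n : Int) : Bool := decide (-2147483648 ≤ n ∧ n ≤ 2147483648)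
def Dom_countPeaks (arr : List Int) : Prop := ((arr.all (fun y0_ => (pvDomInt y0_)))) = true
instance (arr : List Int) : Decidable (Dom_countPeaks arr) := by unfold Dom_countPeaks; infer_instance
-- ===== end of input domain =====

-- B replaces the index-window while loop with a two-pass difference table scanned for descent-then-ascent pairs (alternative decomposition, same cost).


-- ===== PORT A =====
-- the while loop: i runs while i+2 < len(arr), adding 1 when arr[i+1] < arr[i] and arr[i+1] < arr[i+2]
def countPeaksLoop (arr : List Int) (i : Nat) : Int :=
  if _h : i + 2 < arr.length then
    let left := arr.getD i 0
    let right := arr.getD (i + 2) 0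
    let middle := arr.getD (i + 1) 0
    (if middle < left ∧ middle < right then 1 else 0) + countPeaksLoop arr (i + 1)
  else 0
termination_by arr.length - i

def countPeaks (arr : List Int) : Int :=
  if arr.length ≤ 2 then 0 else countPeaksLoop arr 0

-- ===== PORT B =====
def countPeaks_alt (arr : List Int) : Int :=
  let d := (arr.zip arr.tail).map (fun p => p.2 - p.1)
  ((d.zip d.tail).filter (fun p => p.1 < 0 ∧ 0 < p.2)).length

-- ===== PRECONDITION & SPEC =====
def Spec_countPeaks (arr : List Int) (out : Int) : Prop := out = countPeaks_alt arr
instance (arr : List Int) (out : Int) : Decidable (Spec_countPeaks arr out) := by unfold Spec_countPeaks; infer_instance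

-- ===== CLAIM (what is proved, stated in full; the proofs are below) =====
def Claim_equal_countPeaks : Prop := ∀ (arr : List Int), Dom_countPeaks arr → Spec_countPeaks arr (countPeaks arr)

-- ===== LEMMAS AND PROOFS =====

-- window count by structural recursion: the common reference shape
def tri : List Int → Int
  | a :: b :: c :: t => (if b < a ∧ b < c then 1 else 0) + tri (b :: c :: t)
  | _ => 0

theorem tri_short (l : List Int) (h : l.length ≤ 2) : tri l = 0 := by
  match l, h with
  | [], _ => rfl
  | [_], _ => rfl
  | [_, _], _ => rfl
  | _ :: _ :: _ :: _, h => simp at h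

theorem loop_eq_tri (arr : List Int) (i : Nat) :
    countPeaksLoop arr i = tri (arr.drop i) := by
  unfold countPeaksLoop
  split
  · rename_i h
    have h0 : i < arr.length := by omega
    have h1 : i + 1 < arr.length := by omega
    have h2 : i + 2 < arr.length := by omega
    rw [List.drop_eq_getElem_cons h0, List.drop_eq_getElem_cons h1,
        List.drop_eq_getElem_cons h2]
    have ih := loop_eq_tri arr (i + 1)
    rw [List.drop_eq_getElem_cons h1, List.drop_eq_getElem_cons h2] at ih
    simp only [tri, List.getD_eq_getElem _ _ h0, List.getD_eq_getElem _ _ h1,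
      List.getD_eq_getElem _ _ h2]
    rw [ih]
  · rename_i h
    rw [tri_short]
    simp; omega
termination_by arr.length - i

theorem alt_eq_tri (arr : List Int) : countPeaks_alt arr = tri arr := by
  match arr with
  | [] => rfl
  | [_] => rfl
  | [_, _] => rfl
  | a :: b :: c :: t =>
    have ih := alt_eq_tri (b :: c :: t)
    simp only [countPeaks_alt, List.tail, List.zip, List.zipWith, List.map] at ih ⊢
    rw [tri, List.filter_cons]
    by_cases h : b < a ∧ b < c
    · have hd : decide (b - a < 0 ∧ 0 < c - b) = true := by
        simp only [decide_eq_true_eq]; omega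
      rw [hd, if_pos h]
      rw [if_pos rfl, List.length_cons]
      push_cast [ih]
      omega
    · have hd : decide (b - a < 0 ∧ 0 < c - b) = false := by
        simp only [decide_eq_false_iff_not]; omega
      rw [hd, if_neg h, if_neg (by simp)]
      omega

-- ===== VERDICT (by name: the statement is the Claim_ definition above) =====
theorem countPeaks_spec : Claim_equal_countPeaks := by
  intro arr _
  unfold Spec_countPeaks countPeaks
  rw [alt_eq_tri]
  split
  · rename_i h; rw [tri_short arr h]
  · rw [loop_eq_tri]; rfl
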